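-- pv_equiv track=rewrite | github.com/5ugika2u/L-VEIGe_Original | modules/enhanced_image_gen.py | _remove_inappropriate_content
-- ===== SOURCE A (Python) =====
-- def _remove_inappropriate_content(text: str) -> str:
--     """
--     不適切表現のみを除外（速度重視の最小限処理）
--     """
--     # 必要最小限の不適切表現除去
--     unsafe_words = {
--         "violent": "peaceful",
--         "scary": "calm",
--         "dangerous": "safe",
--         "blood": "red",
--         "weapon": "object",
--         "gun": "tool",
--         "knife": "utensil",
--         "death": "sleep",
--         "kill": "stop",
--         "hurt": "touch"
--     }
--
--     safe_text = text.lower()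
--     for unsafe, safe in unsafe_words.items():
--         safe_text = safe_text.replace(unsafe, safe)
--
--     # 元の大文字小文字構造をある程度保持
--     return safe_text.capitalize()
-- ===== SOURCE B (Python) =====
-- def _remove_inappropriate_content(text: str) -> str:
--     """Same sanitisation, done by recursive descent over the word table,
--     each substitution performed as a split-on-key / join-with-value segmentation."""
--     table = [
--         ("violent", "peaceful"),
--         ("scary", "calm"),
--         ("dangerous", "safe"),
--         ("blood", "red"),
--         ("weapon", "object"),
--         ("gun", "tool"),
--         ("knife", "utensil"),
--         ("death", "sleep"),
--         ("kill", "stop"),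
--         ("hurt", "touch"),
--     ]
--
--     def go(s: str, i: int) -> str:
--         if i == len(table):
--             return s
--         unsafe, safe = table[i]
--         return go(safe.join(s.split(unsafe)), i + 1)
--
--     return go(text.lower(), 0).capitalize()
-- ===== Notes on version B (the rewrite author's own statement) =====
-- stated objective: alternative
-- what changed: The for-loop of scan-and-replace passes becomes a recursive descent over the word table in which each substitution is performed by splitting the text on the key and joining the segments with the value.
import Mathlib
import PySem

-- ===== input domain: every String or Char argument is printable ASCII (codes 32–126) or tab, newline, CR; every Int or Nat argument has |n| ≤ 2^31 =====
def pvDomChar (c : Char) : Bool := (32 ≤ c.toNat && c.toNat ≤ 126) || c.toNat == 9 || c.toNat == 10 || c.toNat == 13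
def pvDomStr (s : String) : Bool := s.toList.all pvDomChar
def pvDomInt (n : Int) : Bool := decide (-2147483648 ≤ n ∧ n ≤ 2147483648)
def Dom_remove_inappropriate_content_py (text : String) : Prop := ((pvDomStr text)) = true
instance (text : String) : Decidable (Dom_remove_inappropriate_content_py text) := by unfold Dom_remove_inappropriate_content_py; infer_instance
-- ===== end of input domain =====

-- B replaces the loop of str.replace passes by a recursion over the table doing split-on-key / join-with-value; same result, same cost (objective: alternative).

-- the word table, in the Python dict's insertion order (shared literal data, not logic)
def pvPairs : List (List Char × List Char) :=
  [("violent".toList, "peaceful".toList), ("scary".toList, "calm".toList),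
   ("dangerous".toList, "safe".toList), ("blood".toList, "red".toList),
   ("weapon".toList, "object".toList), ("gun".toList, "tool".toList),
   ("knife".toList, "utensil".toList), ("death".toList, "sleep".toList),
   ("kill".toList, "stop".toList), ("hurt".toList, "touch".toList)]

-- Python str.capitalize(): first char upper-cased, the rest lower-cased (exact on ASCII)
def pvCapitalize : List Char → List Char
  | [] => []
  | c :: t => PySem.Chars.upperChar c :: t.map PySem.Chars.lowerChar

-- ===== PORT A =====
-- s.replace(u, v): leftmost non-overlapping occurrences, scanning resumes after the value
def pvReplaceAll (u v : List Char) : List Char → List Char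
  | [] => []
  | c :: t =>
    if u ≠ [] ∧ u.isPrefixOf (c :: t) then v ++ pvReplaceAll u v ((c :: t).drop u.length)
    else c :: pvReplaceAll u v t
termination_by s => s.length
decreasing_by
  · rename_i h
    have hle : u.length ≤ (c :: t).length := List.IsPrefix.length_le (List.isPrefixOf_iff_prefix.mp h.2)
    have hpos : 0 < u.length := List.length_pos_iff.mpr h.1
    simp only [List.length_drop]
    omega
  · simp

def remove_inappropriate_content_py (text : String) : String :=
  String.ofList (pvCapitalize
    (List.foldl (fun s p => pvReplaceAll p.1 p.2 s) (PySem.Chars.lower text.toList) pvPairs))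

-- ===== PORT B =====
-- s.split(u): segments of s between leftmost non-overlapping occurrences of u
def pvSplitAll (u : List Char) : List Char → List (List Char)
  | [] => [[]]
  | c :: t =>
    if u ≠ [] ∧ u.isPrefixOf (c :: t) then [] :: pvSplitAll u ((c :: t).drop u.length)
    else
      match pvSplitAll u t with
      | [] => [[c]]
      | x :: xs => (c :: x) :: xs
termination_by s => s.length
decreasing_by
  · rename_i h
    have hle : u.length ≤ (c :: t).length := List.IsPrefix.length_le (List.isPrefixOf_iff_prefix.mp h.2)
    have hpos : 0 < u.length := List.length_pos_iff.mpr h.1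
    simp only [List.length_drop]
    omega
  · simp

-- v.join(segments)
def pvJoinWith (v : List Char) : List (List Char) → List Char
  | [] => []
  | [x] => x
  | x :: y :: xs => x ++ v ++ pvJoinWith v (y :: xs)

-- the recursive descent go(s, i) of Source B, as structural recursion over the table
def pvGo : List (List Char × List Char) → List Char → List Char
  | [], s => s
  | (u, v) :: rest, s => pvGo rest (pvJoinWith v (pvSplitAll u s))

def remove_inappropriate_content_py_alt (text : String) : String :=
  String.ofList (pvCapitalize (pvGo pvPairs (PySem.Chars.lower text.toList)))

-- ===== PRECONDITION & SPEC =====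
def Spec_remove_inappropriate_content_py (text : String) (out : String) : Prop := out = remove_inappropriate_content_py_alt text
instance (text : String) (out : String) : Decidable (Spec_remove_inappropriate_content_py text out) := by unfold Spec_remove_inappropriate_content_py; infer_instance

-- ===== CLAIM (what is proved, stated in full; the proofs are below) =====
def Claim_equal_remove_inappropriate_content_py : Prop := ∀ (text : String), Dom_remove_inappropriate_content_py text → Spec_remove_inappropriate_content_py text (remove_inappropriate_content_py text)

-- ===== LEMMAS AND PROOFS =====
theorem pvSplitAll_ne_nil (u : List Char) (s : List Char) : pvSplitAll u s ≠ [] := by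
  fun_induction pvSplitAll u s <;> simp_all

theorem pvJoin_pvSplit (u v s : List Char) :
    pvJoinWith v (pvSplitAll u s) = pvReplaceAll u v s := by
  fun_induction pvSplitAll u s with
  | case1 => simp [pvJoinWith, pvReplaceAll]
  | case2 c t h ih =>
    rw [pvReplaceAll, if_pos h]
    obtain ⟨x, xs, hx⟩ := List.exists_cons_of_ne_nil (pvSplitAll_ne_nil u ((c :: t).drop u.length))
    rw [hx] at ih ⊢
    simp [pvJoinWith, ← ih]
  | case3 c t h heq ih =>
    exact absurd heq (pvSplitAll_ne_nil u t)
  | case4 c t h x xs heq ih =>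
    rw [pvReplaceAll, if_neg h]
    rw [heq] at ih
    rw [← ih]
    cases xs <;> simp [pvJoinWith]

theorem pvGo_eq_foldl (ps : List (List Char × List Char)) (s : List Char) :
    pvGo ps s = List.foldl (fun s p => pvReplaceAll p.1 p.2 s) s ps := by
  induction ps generalizing s with
  | nil => rfl
  | cons p rest ih =>
    obtain ⟨u, v⟩ := p
    simp [pvGo, pvJoin_pvSplit, ih]

-- ===== VERDICT (by name: the statement is the Claim_ definition above) =====
theorem remove_inappropriate_content_py_spec : Claim_equal_remove_inappropriate_content_py := by
  intro text _
  unfold Spec_remove_inappropriate_content_py remove_inappropriate_content_py remove_inappropriate_content_py_alt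
  rw [pvGo_eq_foldl]
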